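-- pv_equiv track=rewrite | github.com/dumrich/TsaAlgo | main.py | GridBoard
-- ===== SOURCE A (Python) =====
-- def GridBoard(OrientationString):
--     GridBoard = [[1, 2],
--                  [3, 4]]
--     MoveList = list(OrientationString)
--     for move in MoveList:
--
--         if move == 'H':
--             GridBoard[0], GridBoard[1] = GridBoard[1], GridBoard[0]
--         elif move == 'V':
--             GridBoard[0][1], GridBoard[0][0] = GridBoard[0][0], GridBoard[0][1]
--             GridBoard[1][1], GridBoard[1][0] = GridBoard[1][0], GridBoard[1][1]
--     return f'{GridBoard[0]},\n{GridBoard[1]}'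
-- ===== SOURCE B (Python) =====
-- def GridBoard(OrientationString):
--     # H flips rows, V flips columns; both are commuting involutions, so only parities matter.
--     h = sum(c == 'H' for c in OrientationString) % 2
--     v = sum(c == 'V' for c in OrientationString) % 2
--     top, bottom = ([3, 4], [1, 2]) if h else ([1, 2], [3, 4])
--     if v:
--         top, bottom = [top[1], top[0]], [bottom[1], bottom[0]]
--     return f'{top},\n{bottom}'
-- ===== Notes on version B (the rewrite author's own statement) =====
-- stated objective: simpler
-- what changed: Replaces the per-move grid simulation with a closed-form application of the two commuting involutions: count H and V moves once, reduce each count to its parity, and apply at most one row swap and one column swap.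
import Mathlib
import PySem

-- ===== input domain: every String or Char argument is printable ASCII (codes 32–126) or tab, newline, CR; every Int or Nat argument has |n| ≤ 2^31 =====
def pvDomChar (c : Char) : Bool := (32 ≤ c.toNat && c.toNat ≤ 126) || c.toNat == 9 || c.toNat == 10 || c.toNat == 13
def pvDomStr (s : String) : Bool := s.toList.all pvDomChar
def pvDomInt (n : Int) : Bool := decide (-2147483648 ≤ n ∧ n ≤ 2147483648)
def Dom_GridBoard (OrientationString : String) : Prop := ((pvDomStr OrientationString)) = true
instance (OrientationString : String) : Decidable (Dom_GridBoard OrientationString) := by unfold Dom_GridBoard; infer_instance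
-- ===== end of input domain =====

-- B replaces the per-move grid simulation by a parity count of H and V moves (simpler closed form; same O(n) cost).


-- ===== PORT A =====
-- state: ((row0col0, row0col1), (row1col0, row1col1))
def pvStepA (g : (Int × Int) × (Int × Int)) (move : Char) : (Int × Int) × (Int × Int) :=
  if move = 'H' then (g.2, g.1)
  else if move = 'V' then ((g.1.2, g.1.1), (g.2.2, g.2.1))
  else g

-- f'{GridBoard[0]},\n{GridBoard[1]}' over Python list reprs
def pvFmtA (g : (Int × Int) × (Int × Int)) : String :=
  "[" ++ PySem.Int.toStr g.1.1 ++ ", " ++ PySem.Int.toStr g.1.2 ++ "],\n[" ++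
    PySem.Int.toStr g.2.1 ++ ", " ++ PySem.Int.toStr g.2.2 ++ "]"

def GridBoard (OrientationString : String) : String :=
  pvFmtA (OrientationString.toList.foldl pvStepA ((1, 2), (3, 4)))

-- ===== PORT B =====
def pvRowB (r : Int × Int) : String :=
  "[" ++ PySem.Int.toStr r.1 ++ ", " ++ PySem.Int.toStr r.2 ++ "]"

def GridBoard_alt (OrientationString : String) : String :=
  let h : Int := (OrientationString.toList.map (fun c => if c == 'H' then (1 : Int) else 0)).sum % 2
  let v : Int := (OrientationString.toList.map (fun c => if c == 'V' then (1 : Int) else 0)).sum % 2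
  let tb : (Int × Int) × (Int × Int) := if h ≠ 0 then ((3, 4), (1, 2)) else ((1, 2), (3, 4))
  let tb := if v ≠ 0 then ((tb.1.2, tb.1.1), (tb.2.2, tb.2.1)) else tb
  pvRowB tb.1 ++ ",\n" ++ pvRowB tb.2

-- ===== PRECONDITION & SPEC =====
def Spec_GridBoard (OrientationString : String) (out : String) : Prop := out = GridBoard_alt OrientationString
instance (OrientationString : String) (out : String) : Decidable (Spec_GridBoard OrientationString out) := by unfold Spec_GridBoard; infer_instance

-- ===== CLAIM (what is proved, stated in full; the proofs are below) =====
def Claim_equal_GridBoard : Prop := ∀ (OrientationString : String), Dom_GridBoard OrientationString → Spec_GridBoard OrientationString (GridBoard OrientationString)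

-- ===== LEMMAS AND PROOFS =====

def pvFlipH (g : (Int × Int) × (Int × Int)) : (Int × Int) × (Int × Int) := (g.2, g.1)
def pvFlipV (g : (Int × Int) × (Int × Int)) : (Int × Int) × (Int × Int) :=
  ((g.1.2, g.1.1), (g.2.2, g.2.1))

def pvF (h v : Nat) (g : (Int × Int) × (Int × Int)) : (Int × Int) × (Int × Int) :=
  (if v % 2 = 1 then pvFlipV else id) ((if h % 2 = 1 then pvFlipH else id) g)

theorem pvF_flipH (h v : Nat) (g : (Int × Int) × (Int × Int)) :
    pvF h v (pvFlipH g) = pvF (h + 1) v g := by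
  rcases Nat.mod_two_eq_zero_or_one h with hm | hm <;>
    simp [pvF, hm, Nat.add_mod, pvFlipH]

theorem pvF_flipV (h v : Nat) (g : (Int × Int) × (Int × Int)) :
    pvF h v (pvFlipV g) = pvF h (v + 1) g := by
  rcases Nat.mod_two_eq_zero_or_one v with hm | hm <;>
    rcases Nat.mod_two_eq_zero_or_one h with hh | hh <;>
      simp [pvF, hm, hh, Nat.add_mod, pvFlipH, pvFlipV]

theorem foldl_stepA (l : List Char) (g : (Int × Int) × (Int × Int)) :
    l.foldl pvStepA g = pvF (l.count 'H') (l.count 'V') g := by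
  induction l generalizing g with
  | nil => simp [pvF]
  | cons c l ih =>
    rw [List.foldl_cons, ih]
    by_cases hH : c = 'H'
    · subst hH
      simp [pvStepA]
      exact pvF_flipH _ _ g
    · by_cases hV : c = 'V'
      · subst hV
        simp [pvStepA, hH]
        exact pvF_flipV _ _ g
      · simp [pvStepA, hH, hV]

theorem sum_ind_eq_count (l : List Char) (c : Char) :
    (l.map (fun x => if x == c then (1 : Int) else 0)).sum = (l.count c : Int) := by
  induction l with
  | nil => simp
  | cons a l ih =>
    simp only [List.map_cons, List.sum_cons, List.count_cons, beq_iff_eq] at ih ⊢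
    by_cases h : a = c <;> simp [h, ih, add_comm]

theorem GridBoard_eq_alt (s : String) : GridBoard s = GridBoard_alt s := by
  unfold GridBoard GridBoard_alt
  rw [foldl_stepA, sum_ind_eq_count, sum_ind_eq_count]
  rcases Nat.mod_two_eq_zero_or_one (s.toList.count 'H') with hh | hh <;>
    rcases Nat.mod_two_eq_zero_or_one (s.toList.count 'V') with hv | hv <;>
      rw [show ((s.toList.count 'H' : Int) % 2) = ((s.toList.count 'H' % 2 : Nat) : Int) by push_cast; rfl,
          show ((s.toList.count 'V' : Int) % 2) = ((s.toList.count 'V' % 2 : Nat) : Int) by push_cast; rfl,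
          hh, hv] <;>
      simp [pvF, hh, hv, pvFlipH, pvFlipV, pvFmtA, pvRowB] <;> rfl

-- ===== VERDICT (by name: the statement is the Claim_ definition above) =====
theorem GridBoard_spec : Claim_equal_GridBoard := by
  intro s _
  exact GridBoard_eq_alt s
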